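-- pv_equiv track=rewrite | github.com/Eddiefans/Sinver | Packages/Scripts/simulador_script.py | validar_accion
-- ===== SOURCE A (Python) =====
-- def validar_accion(accion, acciones):
--     encontrado = 'o'
--     for item in acciones:
--         if item['nombre'].upper() == accion:
--             encontrado = 'nombre'
--         if item['simbolo'] == accion:
--             encontrado = 'simbolo'
--     return encontrado
-- ===== SOURCE B (Python) =====
-- def validar_accion(accion, acciones):
--     # reverse scan with early exit: first match from the end is A's last match
--     for item in reversed(acciones):
--         if item['simbolo'] == accion:
--             return 'simbolo'
--         if item['nombre'].upper() == accion:
--             return 'nombre'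
--     return 'o'
-- ===== Notes on version B (the rewrite author's own statement) =====
-- stated objective: alternative
-- what changed: Replaces the full forward scan that keeps overwriting an accumulator with an early-exit reverse scan that returns on the first match (testing simbolo before nombre to preserve the within-item priority).
import Mathlib
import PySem

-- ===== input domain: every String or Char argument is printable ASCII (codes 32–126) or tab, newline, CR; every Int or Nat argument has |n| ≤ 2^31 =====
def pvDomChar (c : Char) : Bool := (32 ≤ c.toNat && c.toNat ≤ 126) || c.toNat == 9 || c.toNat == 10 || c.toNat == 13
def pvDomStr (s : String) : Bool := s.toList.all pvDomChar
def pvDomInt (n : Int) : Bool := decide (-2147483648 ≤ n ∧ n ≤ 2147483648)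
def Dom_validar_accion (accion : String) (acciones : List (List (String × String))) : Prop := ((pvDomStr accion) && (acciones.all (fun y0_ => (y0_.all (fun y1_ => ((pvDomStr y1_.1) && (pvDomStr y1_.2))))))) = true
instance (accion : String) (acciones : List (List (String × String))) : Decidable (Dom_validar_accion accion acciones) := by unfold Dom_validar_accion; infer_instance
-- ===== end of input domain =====

-- B replaces A's full forward scan with an early-exit reverse scan (return value only; no mutation).

-- ===== PORT A =====
-- item[k] : first-match association-list lookup (dict); total form used under Pre_ (key present)
def pvLookupD (item : List (String × String)) (k : String) : String :=
  ((PySem.Dict.mk item).get? k).getD ""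

def validar_accion (accion : String) (acciones : List (List (String × String))) : String :=
  acciones.foldl (fun encontrado item =>
    let e1 := if PySem.Str.upper (pvLookupD item "nombre") = accion then "nombre" else encontrado
    if pvLookupD item "simbolo" = accion then "simbolo" else e1) "o"

-- ===== PORT B =====
def pvAltLoop (accion : String) : List (List (String × String)) → String
  | [] => "o"
  | item :: rest =>
    if pvLookupD item "simbolo" = accion then "simbolo"
    else if PySem.Str.upper (pvLookupD item "nombre") = accion then "nombre"
    else pvAltLoop accion rest

def validar_accion_alt (accion : String) (acciones : List (List (String × String))) : String :=
  pvAltLoop accion acciones.reverse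

-- ===== PRECONDITION & SPEC =====
-- A raises KeyError when some item lacks the key 'nombre' or 'simbolo'; Pre_ requires both keys in every item.
def Pre_validar_accion (accion : String) (acciones : List (List (String × String))) : Prop :=
  ∀ item ∈ acciones, (PySem.Dict.mk item).contains "nombre" = true ∧ (PySem.Dict.mk item).contains "simbolo" = true
instance (accion : String) (acciones : List (List (String × String))) : Decidable (Pre_validar_accion accion acciones) := by unfold Pre_validar_accion; infer_instance
def pvWitness_validar_accion : String × (List (List (String × String))) :=
  ("X", [[("nombre", "x"), ("simbolo", "+")]])

def Spec_validar_accion (accion : String) (acciones : List (List (String × String))) (out : String) : Prop := out = validar_accion_alt accion acciones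
instance (accion : String) (acciones : List (List (String × String))) (out : String) : Decidable (Spec_validar_accion accion acciones out) := by unfold Spec_validar_accion; infer_instance

-- ===== CLAIM (what is proved, stated in full; the proofs are below) =====
def Claim_equal_validar_accion : Prop := ∀ (accion : String) (acciones : List (List (String × String))), Dom_validar_accion accion acciones → Pre_validar_accion accion acciones → Spec_validar_accion accion acciones (validar_accion accion acciones)

-- ===== LEMMAS AND PROOFS =====

-- the core invariant: A's fold from 'o' equals B's reverse early-exit scan (on all inputs)
theorem pvFold_eq_altLoop (accion : String) (l : List (List (String × String))) :
    l.foldl (fun encontrado item =>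
      let e1 := if PySem.Str.upper (pvLookupD item "nombre") = accion then "nombre" else encontrado
      if pvLookupD item "simbolo" = accion then "simbolo" else e1) "o"
    = pvAltLoop accion l.reverse := by
  induction l using List.reverseRecOn with
  | nil => rfl
  | append_singleton xs x ih =>
    rw [List.foldl_append, List.reverse_append]
    by_cases hs : pvLookupD x "simbolo" = accion <;>
      by_cases hn : PySem.Str.upper (pvLookupD x "nombre") = accion <;>
      simp [pvAltLoop, hs, hn, ih]

-- ===== VERDICT (by name: the statement is the Claim_ definition above) =====
theorem validar_accion_spec : Claim_equal_validar_accion := by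
  intro accion acciones _ _
  unfold Spec_validar_accion validar_accion validar_accion_alt
  exact pvFold_eq_altLoop accion acciones
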